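-- pv_equiv track=rewrite | github.com/picasso653/codesignal_-codes | Interview Prep/repeat_digits_dont_stringify.py | solution
-- ===== SOURCE A (Python) =====
-- def solution(n):
--     res = 0
--     i = 0
--     while n > 0:
--         dd = (n % 10) * 11
--         res += dd * (10 ** i)
--         i += 2
--         n //= 10
--     return res
--     pass
-- ===== SOURCE B (Python) =====
-- def solution(n):
--     ds = []
--     while n > 0:
--         ds.append(n % 10)
--         n //= 10
--     out = 0
--     for d in reversed(ds):
--         out = out * 100 + d * 11
--     return out
-- ===== Notes on version B (the rewrite author's own statement) =====
-- stated objective: alternative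
-- what changed: Replaces A's single loop that accumulates explicit powers of ten into the result with two staged passes: first extract the digit list least-significant-first, then fold over the reversed list, shifting the accumulator two places and appending the doubled digit, so no power term is ever computed.
import Mathlib
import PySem

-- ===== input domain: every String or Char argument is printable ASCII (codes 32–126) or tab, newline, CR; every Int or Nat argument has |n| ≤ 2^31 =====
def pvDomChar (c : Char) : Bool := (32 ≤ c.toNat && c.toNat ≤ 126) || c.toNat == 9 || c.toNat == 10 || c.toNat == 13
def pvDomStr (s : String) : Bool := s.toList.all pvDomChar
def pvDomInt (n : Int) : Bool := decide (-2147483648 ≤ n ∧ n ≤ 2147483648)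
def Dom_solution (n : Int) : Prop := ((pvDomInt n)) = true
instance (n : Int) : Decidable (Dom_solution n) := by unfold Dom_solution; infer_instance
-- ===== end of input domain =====

-- B splits A's single power-accumulating loop into two staged passes: extract the
-- digit list, then fold over it most-significant-first (out = out*100 + d*11).

-- ===== PORT A =====
-- the while loop of A: state (n, res, i); terminates since n.toNat decreases
def solutionLoop (n res : Int) (i : Nat) : Int :=
  if h : n > 0 then
    solutionLoop (PySem.Int.floordiv n 10) (res + (PySem.Int.mod n 10) * 11 * (10 ^ i)) (i + 2)
  else res
termination_by n.toNat
decreasing_by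
  simp only [PySem.Int.floordiv]
  rw [Int.fdiv_eq_ediv_of_nonneg _ (by omega : (0:Int) ≤ 10)]
  omega

def solution (n : Int) : Int := solutionLoop n 0 0

-- ===== PORT B =====
-- pass 1: the digit list, least significant first (B's first while loop)
def digitsOf (n : Int) : List Int :=
  if n > 0 then (PySem.Int.mod n 10) :: digitsOf (PySem.Int.floordiv n 10)
  else []
termination_by n.toNat
decreasing_by
  simp only [PySem.Int.floordiv]
  rw [Int.fdiv_eq_ediv_of_nonneg _ (by omega : (0:Int) ≤ 10)]
  omega

-- pass 2: fold over reversed(ds) (B's for loop)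
def solution_alt (n : Int) : Int :=
  (digitsOf n).reverse.foldl (fun out d => out * 100 + d * 11) 0

-- ===== PRECONDITION & SPEC =====
def Spec_solution (n : Int) (out : Int) : Prop := out = solution_alt n
instance (n : Int) (out : Int) : Decidable (Spec_solution n out) := by unfold Spec_solution; infer_instance

-- ===== CLAIM (what is proved, stated in full; the proofs are below) =====
def Claim_equal_solution : Prop := ∀ (n : Int), Dom_solution n → Spec_solution n (solution n)

-- ===== LEMMAS AND PROOFS =====
theorem solutionLoop_eq (k : Nat) (n : Int) (hk : n.toNat ≤ k) (res : Int) (i : Nat) :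
    solutionLoop n res i = res + solution_alt n * 10 ^ i := by
  induction k generalizing n res i with
  | zero =>
    have hn : ¬ n > 0 := by omega
    rw [solutionLoop, solution_alt, digitsOf]
    simp [hn]
  | succ k ih =>
    by_cases h : n > 0
    · have hd : (PySem.Int.floordiv n 10).toNat ≤ k := by
        simp only [PySem.Int.floordiv]
        rw [Int.fdiv_eq_ediv_of_nonneg _ (by omega : (0:Int) ≤ 10)]
        omega
      rw [solutionLoop]
      simp only [h, dif_pos]
      rw [ih _ hd]
      -- unfold B on n: digits = d :: digits(n/10); reverse & fold
      conv_rhs => rw [solution_alt, digitsOf]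
      simp only [if_pos h, List.reverse_cons, List.foldl_append, List.foldl_cons, List.foldl_nil]
      rw [solution_alt]
      ring
    · rw [solutionLoop, solution_alt, digitsOf]
      simp [h]

-- ===== VERDICT (by name: the statement is the Claim_ definition above) =====
theorem solution_spec : Claim_equal_solution := by
  intro n _
  unfold Spec_solution solution
  rw [solutionLoop_eq n.toNat n le_rfl]
  simp
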